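-- pv_equiv track=rewrite | github.com/fer7una/adelfinio | scripts/story_engine.py | pick_story_roles
-- ===== SOURCE A (Python) =====
-- def pick_story_roles(cast_names: list[str]) -> dict:
--     lead = next((name for name in cast_names if "pelayo" in name.lower()), cast_names[0] if cast_names else "Pelayo")
--     rival = next((name for name in cast_names if "qama" in name.lower()), "Al Qama")
--     bishop = next((name for name in cast_names if "oppas" in name.lower() or "obispo" in name.lower()), "Don Oppas")
--     ally = next((name for name in cast_names if name not in {lead, rival, bishop}), "Guerrero astur")
--     return {
--         "lead": lead,
--         "rival": rival,
--         "bishop": bishop,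
--         "ally": ally,
--         "captain": f"Capitán de {rival}",
--         "chronicler": "Cronista",
--     }
-- ===== SOURCE B (Python) =====
-- def pick_story_roles(cast_names: list[str]) -> dict:
--     # Reverse-overwrite: walk the cast back to front, unconditionally overwriting
--     # each role slot on a match, so the last write (the earliest name) wins.
--     # Accumulators start at the defaults, so no empty-slot/None logic is needed.
--     lead = cast_names[0] if cast_names else "Pelayo"
--     rival = "Al Qama"
--     bishop = "Don Oppas"
--     for name in reversed(cast_names):
--         low = name.lower()
--         if "pelayo" in low:
--             lead = name
--         if "qama" in low:
--             rival = name
--         if "oppas" in low or "obispo" in low: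
--             bishop = name
--     ally = "Guerrero astur"
--     for name in reversed(cast_names):
--         if name != lead and name != rival and name != bishop:
--             ally = name
--     return {
--         "lead": lead,
--         "rival": rival,
--         "bishop": bishop,
--         "ally": ally,
--         "captain": f"Capitán de {rival}",
--         "chronicler": "Cronista",
--     }
-- ===== Notes on version B (the rewrite author's own statement) =====
-- stated objective: alternative
-- what changed: Replaces A's first-match generator scans (with Option-style defaults) by reverse traversals with unconditional overwrite: accumulators are initialized to the defaults and each match simply overwrites, so the last write while walking backwards is exactly the first match in original order; no early exit, no empty-slot logic.
import Mathlib
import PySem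

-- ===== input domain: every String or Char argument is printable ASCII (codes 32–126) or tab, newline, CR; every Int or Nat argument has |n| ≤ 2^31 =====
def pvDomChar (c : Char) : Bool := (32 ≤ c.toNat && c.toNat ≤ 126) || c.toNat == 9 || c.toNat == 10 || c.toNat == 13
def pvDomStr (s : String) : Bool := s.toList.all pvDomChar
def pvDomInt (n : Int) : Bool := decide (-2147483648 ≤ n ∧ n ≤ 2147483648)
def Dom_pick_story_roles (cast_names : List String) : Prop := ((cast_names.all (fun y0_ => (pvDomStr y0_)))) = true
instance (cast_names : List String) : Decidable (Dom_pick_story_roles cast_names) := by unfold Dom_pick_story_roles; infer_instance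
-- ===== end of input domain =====

-- B replaces A's first-match scans by reverse traversals with unconditional overwrite (defaults as initial accumulators); same cost, different algorithm.

-- ===== PORT A =====
def pick_story_roles (cast_names : List String) : List (String × String) :=
  let lead := (cast_names.find? (fun name => PySem.Str.isIn "pelayo" (PySem.Str.lower name))).getD
      (match cast_names with | [] => "Pelayo" | x :: _ => x)
  let rival := (cast_names.find? (fun name => PySem.Str.isIn "qama" (PySem.Str.lower name))).getD "Al Qama"
  let bishop := (cast_names.find? (fun name =>
      PySem.Str.isIn "oppas" (PySem.Str.lower name) || PySem.Str.isIn "obispo" (PySem.Str.lower name))).getD "Don Oppas"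
  let ally := (cast_names.find? (fun name =>
      !(PySem.Set.contains (PySem.Set.ofList [lead, rival, bishop]) name))).getD "Guerrero astur"
  [("lead", lead), ("rival", rival), ("bishop", bishop), ("ally", ally),
   ("captain", "Capitán de " ++ rival), ("chronicler", "Cronista")]

-- ===== PORT B =====
-- one step of B's reverse loop: overwrite each role slot unconditionally on a match
def pvRoleStep (st : String × String × String) (name : String) : String × String × String :=
  let low := PySem.Str.lower name
  (if PySem.Str.isIn "pelayo" low then name else st.1,
   if PySem.Str.isIn "qama" low then name else st.2.1,
   if PySem.Str.isIn "oppas" low || PySem.Str.isIn "obispo" low then name else st.2.2)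

def pick_story_roles_alt (cast_names : List String) : List (String × String) :=
  let st := cast_names.reverse.foldl pvRoleStep
      ((match cast_names with | [] => "Pelayo" | x :: _ => x), "Al Qama", "Don Oppas")
  let lead := st.1
  let rival := st.2.1
  let bishop := st.2.2
  let ally := cast_names.reverse.foldl
      (fun a n => if n != lead && n != rival && n != bishop then n else a) "Guerrero astur"
  [("lead", lead), ("rival", rival), ("bishop", bishop), ("ally", ally),
   ("captain", "Capitán de " ++ rival), ("chronicler", "Cronista")]

-- ===== PRECONDITION & SPEC =====
def Spec_pick_story_roles (cast_names : List String) (out : List (String × String)) : Prop := out = pick_story_roles_alt cast_names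
instance (cast_names : List String) (out : List (String × String)) : Decidable (Spec_pick_story_roles cast_names out) := by unfold Spec_pick_story_roles; infer_instance

-- ===== CLAIM =====
def Claim_equal_pick_story_roles : Prop := ∀ (cast_names : List String), Dom_pick_story_roles cast_names → Spec_pick_story_roles cast_names (pick_story_roles cast_names)

-- ===== LEMMAS AND PROOFS =====

-- reverse fold with unconditional overwrite = first match (default if none)
theorem pvRevFold_find (p : String → Bool) (l : List String) (d : String) :
    l.reverse.foldl (fun a n => if p n then n else a) d = (l.find? p).getD d := by
  induction l with
  | nil => rfl
  | cons x xs ih =>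
    simp only [List.reverse_cons, List.foldl_append, List.foldl_cons, List.foldl_nil, ih,
      List.find?]
    cases hp : p x <;> simp

theorem pvRevFold_triple (l : List String) (d1 d2 d3 : String) :
    l.reverse.foldl pvRoleStep (d1, d2, d3) =
      ((l.find? (fun name => PySem.Str.isIn "pelayo" (PySem.Str.lower name))).getD d1,
       (l.find? (fun name => PySem.Str.isIn "qama" (PySem.Str.lower name))).getD d2,
       (l.find? (fun name =>
         PySem.Str.isIn "oppas" (PySem.Str.lower name) || PySem.Str.isIn "obispo" (PySem.Str.lower name))).getD d3) := by
  induction l with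
  | nil => rfl
  | cons x xs ih =>
    simp only [List.reverse_cons, List.foldl_append, List.foldl_cons, List.foldl_nil, ih,
      List.find?, pvRoleStep]
    cases h1 : PySem.Str.isIn "pelayo" (PySem.Str.lower x) <;>
      cases h2 : PySem.Str.isIn "qama" (PySem.Str.lower x) <;>
        cases h3 : PySem.Str.isIn "oppas" (PySem.Str.lower x) <;>
          cases h4 : PySem.Str.isIn "obispo" (PySem.Str.lower x) <;> simp

-- find? respects pointwise-equal predicates
theorem pvFindExt (p q : String → Bool) (h : ∀ n, p n = q n) (l : List String) :
    l.find? p = l.find? q := by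
  induction l with
  | nil => rfl
  | cons x xs ih =>
    simp only [List.find?, h x, ih]

-- A's set-membership test and B's three inequality tests are the same predicate
theorem pvAllyPred (a b c n : String) :
    (!(PySem.Set.contains (PySem.Set.ofList [a, b, c]) n)) = (n != a && n != b && n != c) := by
  have hiff : PySem.Set.contains (PySem.Set.ofList [a, b, c]) n = true ↔ (n = a ∨ n = b ∨ n = c) := by
    rw [PySem.Set.contains_iff, PySem.Set.mem_ofList]; simp
  by_cases h : n = a ∨ n = b ∨ n = c
  · rw [hiff.mpr h]
    rcases h with h | h | h <;> simp [h]
  · have hc : PySem.Set.contains (PySem.Set.ofList [a, b, c]) n = false :=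
      Bool.eq_false_iff.mpr (fun ht => h (hiff.mp ht))
    simp only [not_or] at h
    rw [hc]; simp [h.1, h.2.1, h.2.2]

-- ===== VERDICT =====
theorem pick_story_roles_spec : Claim_equal_pick_story_roles := by
  intro cast_names _
  unfold Spec_pick_story_roles
  simp only [pick_story_roles, pick_story_roles_alt, pvRevFold_triple, pvRevFold_find]
  rw [pvFindExt _ _ (fun n => pvAllyPred _ _ _ n) cast_names]
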